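-- pv_equiv track=rewrite | github.com/IAMAl/CGRACompiler | Gen_AGUCode.py | DuplicatedDFGNodeRemover
-- ===== SOURCE A (Python) =====
-- def DuplicatedDFGNodeRemover( LLVM_IR ):
--
--     LLVM_IR_ = []
--     for Cycle_No, CycleBBlocks in enumerate(LLVM_IR):
--         Cycle_LLVM_IR = []
--         for bb_no, BBlock in enumerate(CycleBBlocks):
--
--             Duplicate = False
--             for chk_bb_no in range(bb_no+1, len(CycleBBlocks), +1):
--                 Chk_BBlock = CycleBBlocks[chk_bb_no]
--                 if Chk_BBlock == BBlock and not " " == Chk_BBlock and not "br" in Chk_BBlock: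
--                     Duplicate = True
--                     break
--
--             if not Duplicate:
--                 Cycle_LLVM_IR.append(BBlock)
--
--         LLVM_IR_.append(Cycle_LLVM_IR)
--
--
--     return LLVM_IR_
-- ===== SOURCE B (Python) =====
-- def DuplicatedDFGNodeRemover(LLVM_IR):
--     result = []
--     for CycleBBlocks in LLVM_IR:
--         kept = []
--         seen = set()
--         for BBlock in reversed(CycleBBlocks):
--             if BBlock == " " or "br" in BBlock or BBlock not in seen:
--                 kept.append(BBlock)
--             seen.add(BBlock)
--         kept.reverse()
--         result.append(kept)
--     return result
-- ===== Notes on version B (the rewrite author's own statement) =====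
-- stated objective: faster
-- what changed: Replaced A's per-block forward rescan of the rest of the cycle with a single reversed pass per cycle that maintains a set of blocks already seen later, keeping a block iff it is " ", contains "br", or has not been seen later; output is built back-to-front and reversed.
import Mathlib
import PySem

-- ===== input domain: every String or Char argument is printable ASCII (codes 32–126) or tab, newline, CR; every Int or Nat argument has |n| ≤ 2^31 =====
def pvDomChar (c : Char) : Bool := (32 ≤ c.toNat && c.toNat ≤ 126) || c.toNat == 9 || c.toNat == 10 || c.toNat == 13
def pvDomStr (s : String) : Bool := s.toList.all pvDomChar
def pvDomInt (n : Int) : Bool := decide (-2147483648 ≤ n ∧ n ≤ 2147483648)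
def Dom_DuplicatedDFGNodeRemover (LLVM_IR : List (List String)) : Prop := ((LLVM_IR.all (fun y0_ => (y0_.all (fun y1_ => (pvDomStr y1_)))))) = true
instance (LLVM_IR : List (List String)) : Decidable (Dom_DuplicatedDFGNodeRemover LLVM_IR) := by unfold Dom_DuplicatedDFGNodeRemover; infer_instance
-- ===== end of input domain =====

-- B replaces A's quadratic per-block forward rescans with one reversed pass per cycle
-- maintaining a set of blocks seen later (objective: faster, O(n) per cycle).

-- ===== PORT A =====
-- inner 'for chk_bb_no in range(bb_no+1, len(CycleBBlocks))' loop with break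
def pvDupLoopA (cyc : List String) (bb : String) : List Int → Bool
  | [] => false
  | i :: rest =>
    match PySem.List.pyGet? cyc i with
    | none => false   -- unreachable: range indices are in bounds
    | some chk =>
      if chk == bb && !(" " == chk) && !(PySem.Str.isIn "br" chk) then true
      else pvDupLoopA cyc bb rest

-- per-cycle body of A's outer loop
def pvCycleA (cyc : List String) : List String :=
  (PySem.List.enumerate cyc).foldl
    (fun acc p =>
      if pvDupLoopA cyc p.2 (PySem.List.pyRange (p.1 + 1) (cyc.length : Int) 1) then acc
      else acc ++ [p.2]) []

def DuplicatedDFGNodeRemover (LLVM_IR : List (List String)) : List (List String) :=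
  (PySem.List.enumerate LLVM_IR).foldl (fun acc p => acc ++ [pvCycleA p.2]) []

-- ===== PORT B =====
-- body of B's reversed loop: state is (kept, seen)
def pvStepB (st : List String × PySem.Set String) (s : String) : List String × PySem.Set String :=
  (if s == " " || PySem.Str.isIn "br" s || !(PySem.Set.contains st.2 s) then st.1 ++ [s] else st.1,
   PySem.Set.add st.2 s)

def pvCycleB (cyc : List String) : List String :=
  (cyc.reverse.foldl pvStepB ([], PySem.Set.empty)).1.reverse

def DuplicatedDFGNodeRemover_alt (LLVM_IR : List (List String)) : List (List String) :=
  LLVM_IR.foldl (fun acc cyc => acc ++ [pvCycleB cyc]) []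

-- ===== PRECONDITION & SPEC =====
def Spec_DuplicatedDFGNodeRemover (LLVM_IR : List (List String)) (out : List (List String)) : Prop := out = DuplicatedDFGNodeRemover_alt LLVM_IR
instance (LLVM_IR : List (List String)) (out : List (List String)) : Decidable (Spec_DuplicatedDFGNodeRemover LLVM_IR out) := by unfold Spec_DuplicatedDFGNodeRemover; infer_instance

-- ===== CLAIM (what is proved, stated in full; the proofs are below) =====
def Claim_equal_DuplicatedDFGNodeRemover : Prop := ∀ (LLVM_IR : List (List String)), Dom_DuplicatedDFGNodeRemover LLVM_IR → Spec_DuplicatedDFGNodeRemover LLVM_IR (DuplicatedDFGNodeRemover LLVM_IR)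

-- ===== LEMMAS AND PROOFS =====

-- "keep unconditionally" condition shared by both eligibility tests
def pvQ (s : String) : Bool := s == " " || PySem.Str.isIn "br" s

-- proof-side structural recursion for B's reversed pass, with the initial seen-set generalized
def pvGo (s0 : PySem.Set String) : List String → List String × PySem.Set String
  | [] => ([], s0)
  | s :: rest =>
    (if pvQ s || !(PySem.Set.contains ((pvGo s0 rest).2) s) then s :: (pvGo s0 rest).1
     else (pvGo s0 rest).1,
     PySem.Set.add ((pvGo s0 rest).2) s)

lemma pv_contains_add (t : PySem.Set String) (x y : String) :
    PySem.Set.contains (PySem.Set.add t x) y = (y == x || PySem.Set.contains t y) := by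
  simp only [PySem.Set.add]
  by_cases h : PySem.Set.contains t x = true
  · rw [if_pos h]
    cases hy : (y == x)
    · simp
    · have hxy : y = x := by simpa using hy
      subst hxy
      simp only [Bool.true_or]
      rw [PySem.Set.contains_iff]
      exact (PySem.Set.contains_iff t y).mp h
  · rw [if_neg h]
    simp only [PySem.Set.contains_eq_listContains] at *
    cases hy : (y == x) <;> simp_all

lemma pvGo_seen_contains (s0 : PySem.Set String) (cyc : List String) (x : String) :
    PySem.Set.contains ((pvGo s0 cyc).2) x = (cyc.contains x || PySem.Set.contains s0 x) := by
  induction cyc with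
  | nil => simp [pvGo]
  | cons s rest ih =>
    simp only [pvGo, pv_contains_add, ih, List.contains_cons]
    cases h : (x == s) <;> simp [Bool.or_comm]

lemma pvStepB_eq (k : List String) (t : PySem.Set String) (s : String) :
    pvStepB (k, t) s = (if pvQ s || !(PySem.Set.contains t s) then k ++ [s] else k, PySem.Set.add t s) := by
  simp [pvStepB, pvQ, Bool.or_assoc]

lemma pvFoldB (cyc : List String) (k0 : List String) (s0 : PySem.Set String) :
    cyc.reverse.foldl pvStepB (k0, s0) = (k0 ++ ((pvGo s0 cyc).1).reverse, (pvGo s0 cyc).2) := by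
  induction cyc generalizing k0 with
  | nil => simp [pvGo]
  | cons s rest ih =>
    rw [List.reverse_cons, List.foldl_append, ih, List.foldl_cons, List.foldl_nil, pvStepB_eq]
    simp only [pvGo]
    cases h : (pvQ s || !(PySem.Set.contains ((pvGo s0 rest).2) s)) <;> simp

lemma pvCycleB_eq (cyc : List String) : pvCycleB cyc = (pvGo PySem.Set.empty cyc).1 := by
  unfold pvCycleB
  rw [pvFoldB]
  simp

lemma pvDupLoopA_eq (cyc : List String) (bb : String) :
    ∀ (n i : Nat), cyc.length - i ≤ n →
    pvDupLoopA cyc bb (PySem.List.pyRange (i : Int) (cyc.length : Int) 1)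
      = (cyc.drop i).any (fun c => c == bb && !(" " == c) && !(PySem.Str.isIn "br" c)) := by
  intro n
  induction n with
  | zero =>
    intro i hi
    have h : cyc.length ≤ i := by omega
    rw [PySem.List.pyRange_one_eq_nil (by exact_mod_cast h), List.drop_eq_nil_of_le h]
    simp [pvDupLoopA]
  | succ n ih =>
    intro i hi
    by_cases h : i < cyc.length
    · rw [PySem.List.pyRange_one_cons (by exact_mod_cast h)]
      have hget : PySem.List.pyGet? cyc (i : Int) = some cyc[i] := by
        simp [PySem.List.pyGet?_natCast, List.getElem?_eq_getElem h]
      have hdrop : cyc.drop i = cyc[i] :: cyc.drop (i + 1) := List.drop_eq_getElem_cons h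
      have hcast : ((i : Int) + 1) = ((i + 1 : Nat) : Int) := by push_cast; ring
      rw [hcast]
      simp only [pvDupLoopA, hget, hdrop, List.any_cons]
      by_cases hc : (cyc[i] == bb && !(" " == cyc[i]) && !(PySem.Str.isIn "br" cyc[i])) = true
      · rw [if_pos hc, hc]
        simp
      · rw [if_neg hc, ih (i + 1) (by omega)]
        simp only [Bool.not_eq_true] at hc
        rw [hc]
        simp
    · have h2 : cyc.length ≤ i := by omega
      rw [PySem.List.pyRange_one_eq_nil (by exact_mod_cast h2), List.drop_eq_nil_of_le h2]
      simp [pvDupLoopA]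

lemma pvAny_char (l : List String) (s : String) :
    l.any (fun c => c == s && !(" " == c) && !(PySem.Str.isIn "br" c))
      = (l.contains s && !(pvQ s)) := by
  induction l with
  | nil => simp
  | cons c rest ih =>
    rw [List.any_cons, ih, List.contains_cons]
    by_cases h : c = s
    · subst h
      have h1 : (" " == c) = (c == " ") := Bool.beq_comm
      simp only [beq_self_eq_true, Bool.true_and, h1, pvQ]
      cases h2 : (c == " ") <;> cases h3 : PySem.Str.isIn "br" c <;> simp
    · have h4 : (c == s) = false := by simp [h]
      have h5 : (s == c) = false := by simp [Ne.symm h]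
      simp [h4, h5]

lemma pvCycleA_aux (cyc : List String) :
    ∀ (rest : List String) (i : Nat) (acc : List String), cyc.drop i = rest →
    (PySem.List.enumerate rest (i : Int)).foldl
      (fun acc p =>
        if pvDupLoopA cyc p.2 (PySem.List.pyRange (p.1 + 1) (cyc.length : Int) 1) then acc
        else acc ++ [p.2]) acc
      = acc ++ (pvGo PySem.Set.empty rest).1 := by
  intro rest
  induction rest with
  | nil => intro i acc _; simp [PySem.List.enumerate_nil, pvGo]
  | cons s rest' ih =>
    intro i acc hdrop
    have hdrop' : cyc.drop (i + 1) = rest' := by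
      have h2 : List.drop 1 (List.drop i cyc) = rest' := by rw [hdrop, List.drop_one, List.tail_cons]
      rw [List.drop_drop] at h2
      simpa [Nat.add_comm] using h2
    have hcast : ((i : Int) + 1) = ((i + 1 : Nat) : Int) := by push_cast; ring
    rw [PySem.List.enumerate_cons, List.foldl_cons]
    simp only [hcast]
    rw [pvDupLoopA_eq cyc s (cyc.length - (i + 1)) (i + 1) (le_refl _), hdrop', pvAny_char]
    have hseen : PySem.Set.contains ((pvGo PySem.Set.empty rest').2) s = rest'.contains s := by
      rw [pvGo_seen_contains]
      simp [PySem.Set.empty, PySem.Set.contains]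
    show _ = acc ++ (pvGo PySem.Set.empty (s :: rest')).1
    simp only [pvGo, hseen]
    cases hq : pvQ s <;> cases hm : rest'.contains s <;>
      simp only [Bool.and_true, Bool.and_false, Bool.not_true, Bool.not_false,
        Bool.true_or, Bool.false_or, if_true] <;>
      rw [ih (i + 1) _ hdrop'] <;> simp

lemma pvCycle_eq (cyc : List String) : pvCycleA cyc = pvCycleB cyc := by
  rw [pvCycleB_eq]
  unfold pvCycleA
  have := pvCycleA_aux cyc cyc 0 [] (by simp)
  simpa using this

lemma pvOuterA (l : List (List String)) :
    ∀ (i : Int) (acc : List (List String)),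
    (PySem.List.enumerate l i).foldl (fun acc p => acc ++ [pvCycleA p.2]) acc
      = acc ++ l.map pvCycleA := by
  induction l with
  | nil => intro i acc; simp [PySem.List.enumerate_nil]
  | cons c rest ih =>
    intro i acc
    rw [PySem.List.enumerate_cons, List.foldl_cons, ih]
    simp

-- ===== VERDICT (by name: the statement is the Claim_ definition above) =====
theorem DuplicatedDFGNodeRemover_spec : Claim_equal_DuplicatedDFGNodeRemover := by
  intro LLVM_IR _
  show _ = _
  unfold DuplicatedDFGNodeRemover DuplicatedDFGNodeRemover_alt
  rw [pvOuterA, PySem.List.foldl_append_singleton_eq_map pvCycleB]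
  simp [pvCycle_eq]
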